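-- pv_equiv track=rewrite | github.com/brendan-ch/advent-of-code-2020 | day6.py | getListQuestions
-- ===== SOURCE A (Python) =====
-- def getListQuestions(group):
--   """Return the list of questions that everyone in the group answered "yes" to."""
--
--   listQuestionsAll = []  # this will track all questions that at least one person answered "yes" to
--   listQuestions = []  # this will track questions that all members of the group answered "yes" to
--
--   groupMap = group.split('\n')
--
--   for line in groupMap:
--     for letter in line:
--       if (not letter in listQuestionsAll):
--         listQuestionsAll.append(letter)  # start tracking letter
--         listQuestions.append(letter)
--
--     for letter in listQuestionsAll:  # remove items from listQuestions that aren't in all lines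
--       listConditionals = [letter in line for line in groupMap]
--
--       if (not all(listConditionals) and letter in listQuestions):
--         listQuestions.remove(letter)
--
--   return listQuestions
-- ===== SOURCE B (Python) =====
-- def getListQuestions(group):
--   """Return the list of questions that everyone in the group answered "yes" to."""
--   lines = group.split('\n')
--   common = set(lines[0])
--   for line in lines[1:]:
--     common &= set(line)
--   res = []
--   for line in lines:
--     for ch in dict.fromkeys(line):
--       if ch in common and ch not in res:
--         res.append(ch)
--   return res
-- ===== Notes on version B (the rewrite author's own statement) =====
-- stated objective: faster
-- what changed: B intersects per-line character sets once and then emits, per line, the line's distinct letters (dict.fromkeys) that lie in the intersection, instead of A's per-line removal pass that rescans every line of the group for every letter seen so far.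
import Mathlib
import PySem

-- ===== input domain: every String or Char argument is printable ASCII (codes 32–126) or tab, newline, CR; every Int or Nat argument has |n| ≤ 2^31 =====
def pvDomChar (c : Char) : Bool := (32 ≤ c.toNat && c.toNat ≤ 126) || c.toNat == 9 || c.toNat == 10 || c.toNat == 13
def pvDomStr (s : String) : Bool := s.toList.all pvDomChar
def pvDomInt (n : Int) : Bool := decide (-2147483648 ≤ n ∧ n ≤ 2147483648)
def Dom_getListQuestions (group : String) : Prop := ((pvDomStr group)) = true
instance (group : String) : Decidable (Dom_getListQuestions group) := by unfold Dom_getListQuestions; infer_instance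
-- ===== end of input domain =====

-- B intersects per-line letter sets and emits first-appearance-ordered letters of the intersection, replacing A's per-letter rescans of every line (measured faster in a timing run).

-- ===== PORT A =====
-- 'letter in line' on a 1-char string is char membership: ported as line.toList.contains letter (exact).
-- list.remove is guarded by 'letter in listQuestions', so remove? always succeeds; .getD is never the default.
def getListQuestions (group : String) : List String :=
  let groupMap := (PySem.Str.split? group "\n").getD []
  let st := groupMap.foldl (fun (st : List Char × List Char) line =>
    let st := line.toList.foldl (fun (st : List Char × List Char) letter =>
      if !(st.1.contains letter) then (st.1 ++ [letter], st.2 ++ [letter]) else st) st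
    let qs := st.1.foldl (fun qs letter =>
      let listConditionals := groupMap.map (fun line => line.toList.contains letter)
      if !(listConditionals.all id) && qs.contains letter then
        (PySem.List.remove? qs letter).getD qs
      else qs) st.2
    (st.1, qs)) ([], [])
  st.2.map (fun c => String.ofList [c])

-- ===== PORT B =====
-- split? with the nonempty literal sep "\n" is always some: .getD's [] is unreachable.
-- lines[0]: split never returns an empty list, so headD's default is never used.
def getListQuestions_alt (group : String) : List String :=
  let lines := (PySem.Str.split? group "\n").getD []
  let common : PySem.Set Char := (lines.drop 1).foldl
    (fun s line => PySem.Set.inter s (PySem.Set.ofList line.toList))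
    (PySem.Set.ofList (lines.headD "").toList)
  let res := lines.foldl (fun res line =>
    (PySem.List.dedup line.toList).foldl (fun (res : List Char) ch =>
      if PySem.Set.contains common ch && !(res.contains ch) then res ++ [ch] else res) res) []
  res.map (fun c => String.ofList [c])

-- ===== PRECONDITION & SPEC =====
def Spec_getListQuestions (group : String) (out : List String) : Prop := out = getListQuestions_alt group
instance (group : String) (out : List String) : Decidable (Spec_getListQuestions group out) := by unfold Spec_getListQuestions; infer_instance

-- ===== CLAIM (what is proved, stated in full; the proofs are below) =====
def Claim_equal_getListQuestions : Prop := ∀ (group : String), Dom_getListQuestions group → Spec_getListQuestions group (getListQuestions group)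

-- ===== LEMMAS AND PROOFS =====

-- accumulate first-seen letters
def pvAddA (all : List Char) (cs : List Char) : List Char :=
  cs.foldl (fun all c => if c ∈ all then all else all ++ [c]) all

-- the letters newly added by pvAddA
def pvNew (all : List Char) : List Char → List Char
  | [] => []
  | c :: cs => if c ∈ all then pvNew all cs else c :: pvNew (all ++ [c]) cs

theorem pvAddA_nil (all : List Char) : pvAddA all [] = all := rfl

theorem pvAddA_cons (all : List Char) (c : Char) (cs : List Char) :
    pvAddA all (c :: cs) = pvAddA (if c ∈ all then all else all ++ [c]) cs := rfl

theorem pvAddA_eq_append (cs : List Char) : ∀ all, pvAddA all cs = all ++ pvNew all cs := by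
  induction cs with
  | nil => intro all; simp [pvAddA_nil, pvNew]
  | cons c cs ih =>
    intro all
    rw [pvAddA_cons]
    by_cases h : c ∈ all
    · rw [if_pos h, ih, pvNew, if_pos h]
    · rw [if_neg h, ih, pvNew, if_neg h]
      simp

theorem pvNew_cons_mem {all : List Char} {c : Char} (cs : List Char) (h : c ∈ all) :
    pvNew all (c :: cs) = pvNew all cs := by rw [pvNew, if_pos h]

theorem pvNew_cons_not_mem {all : List Char} {c : Char} (cs : List Char) (h : c ∉ all) :
    pvNew all (c :: cs) = c :: pvNew (all ++ [c]) cs := by rw [pvNew, if_neg h]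

-- feeding pvNew's output back in changes nothing (duplicates were no-ops already)
theorem pvNew_pvNew (cs : List Char) : ∀ b all : List Char, b ⊆ all →
    pvNew all (pvNew b cs) = pvNew all cs := by
  induction cs with
  | nil => intro b all _; simp [pvNew]
  | cons c cs ih =>
    intro b all hba
    by_cases hb : c ∈ b
    · rw [pvNew_cons_mem cs hb, pvNew_cons_mem cs (hba hb)]
      exact ih b all hba
    · rw [pvNew_cons_not_mem cs hb]
      by_cases ha : c ∈ all
      · rw [pvNew_cons_mem _ ha, pvNew_cons_mem _ ha]
        refine ih (b ++ [c]) all ?_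
        intro x hx
        rcases List.mem_append.mp hx with h | h
        · exact hba h
        · exact (List.mem_singleton.mp h) ▸ ha
      · rw [pvNew_cons_not_mem _ ha, pvNew_cons_not_mem _ ha]
        congr 1
        refine ih (b ++ [c]) (all ++ [c]) ?_
        intro x hx
        rcases List.mem_append.mp hx with h | h
        · exact List.mem_append_left _ (hba h)
        · exact List.mem_append_right _ h

theorem pvSetAdd_eq (s : List Char) (x : Char) :
    PySem.Set.add s x = if x ∈ s then s else s ++ [x] := by
  by_cases h : x ∈ s <;> simp [PySem.Set.add, h]

theorem pvDedup_eq_pvNew (cs : List Char) : PySem.List.dedup cs = pvNew [] cs := by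
  have h1 : PySem.List.dedup cs = cs.foldl PySem.Set.add [] := by
    rw [PySem.List.dedup_eq_ofList, PySem.Set.ofList_eq_foldl]
  have h2 : cs.foldl PySem.Set.add [] = pvAddA [] cs := by
    unfold pvAddA
    congr 1
    funext s x
    exact pvSetAdd_eq s x
  rw [h1, h2, pvAddA_eq_append, List.nil_append]

theorem pvAddA_dedup (all cs : List Char) :
    pvAddA all (PySem.List.dedup cs) = pvAddA all cs := by
  rw [pvDedup_eq_pvNew, pvAddA_eq_append, pvAddA_eq_append,
    pvNew_pvNew cs [] all (by simp)]

theorem pvNew_not_mem (cs : List Char) : ∀ all c, c ∈ pvNew all cs → c ∉ all := by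
  induction cs with
  | nil => intro all c h; simp [pvNew] at h
  | cons x cs ih =>
    intro all c h hmem
    by_cases hx : x ∈ all
    · rw [pvNew, if_pos hx] at h
      exact ih all c h hmem
    · rw [pvNew, if_neg hx] at h
      rcases List.mem_cons.mp h with rfl | h
      · exact hx hmem
      · exact ih _ c h (List.mem_append_left _ hmem)

theorem pvNew_nodup (cs : List Char) : ∀ all, (pvNew all cs).Nodup := by
  induction cs with
  | nil => intro all; simp [pvNew]
  | cons x cs ih =>
    intro all
    by_cases hx : x ∈ all
    · rw [pvNew, if_pos hx]; exact ih all
    · rw [pvNew, if_neg hx]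
      refine List.nodup_cons.mpr ⟨fun hmem => ?_, ih _⟩
      exact (pvNew_not_mem cs _ x hmem) (by simp)

theorem pvAddA_nodup (cs : List Char) (all : List Char) (h : all.Nodup) : (pvAddA all cs).Nodup := by
  rw [pvAddA_eq_append, List.nodup_append]
  refine ⟨h, pvNew_nodup cs all, ?_⟩
  intro a ha b hb
  rintro rfl
  exact pvNew_not_mem cs all a hb ha

-- A's inner (letter-collecting) fold on the pair state
theorem pvA_inner (cs : List Char) : ∀ all qs,
    cs.foldl (fun (st : List Char × List Char) letter =>
      if !(st.1.contains letter) then (st.1 ++ [letter], st.2 ++ [letter]) else st) (all, qs)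
    = (pvAddA all cs, qs ++ pvNew all cs) := by
  induction cs with
  | nil => intro all qs; simp [pvAddA_nil, pvNew]
  | cons c cs ih =>
    intro all qs
    rw [List.foldl_cons, pvAddA_cons, pvNew]
    by_cases h : c ∈ all
    · rw [if_pos h, if_pos h]
      have : (if (!(all.contains c)) = true then (all ++ [c], qs ++ [c]) else (all, qs)) = (all, qs) := by
        simp [h]
      rw [this]; exact ih all qs
    · rw [if_neg h, if_neg h]
      have : (if (!(all.contains c)) = true then (all ++ [c], qs ++ [c]) else (all, qs))
          = (all ++ [c], qs ++ [c]) := by simp [h]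
      rw [this, ih]
      simp

-- A's removal fold
theorem pvA_remove (P : Char → Bool) (todo : List Char) : ∀ qs : List Char, qs.Nodup →
    todo.foldl (fun qs letter =>
      if !(P letter) && qs.contains letter then (PySem.List.remove? qs letter).getD qs else qs) qs
    = qs.filter (fun c => P c || !(todo.contains c)) := by
  induction todo with
  | nil => intro qs h; simp
  | cons t todo ih =>
    intro qs hnd
    rw [List.foldl_cons]
    by_cases hP : P t = true
    · rw [if_neg (by simp [hP])]
      rw [ih qs hnd]
      refine List.filter_congr fun c _ => ?_
      by_cases hc : c = t <;> simp [hc, hP]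
    · by_cases hmem : t ∈ qs
      · rw [if_pos (by simp [hP, hmem])]
        rw [PySem.List.remove?_eq_some_erase qs t hmem, Option.getD_some]
        rw [ih _ (hnd.erase t)]
        rw [List.Nodup.erase_eq_filter hnd]
        rw [List.filter_filter]
        refine List.filter_congr fun c _ => ?_
        by_cases hc : c = t
        · simp [hc, hP]
        · simp [hc]
      · rw [if_neg (by simp [hP, hmem])]
        rw [ih qs hnd]
        refine List.filter_congr fun c hcq => ?_
        by_cases hc : c = t
        · exact absurd (hc ▸ hcq) hmem
        · simp [hc]

-- A's outer fold: invariant qs = all.filter P, where P letter says every line contains letter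
theorem pvA_outer (P : Char → Bool)
    (step : List Char × List Char → String → List Char × List Char)
    (hstep : ∀ st line, step st line =
      (let st := line.toList.foldl (fun (st : List Char × List Char) letter =>
        if !(st.1.contains letter) then (st.1 ++ [letter], st.2 ++ [letter]) else st) st
       let qs := st.1.foldl (fun qs letter =>
        if !(P letter) && qs.contains letter then (PySem.List.remove? qs letter).getD qs else qs) st.2
       (st.1, qs)))
    (lines : List String) : ∀ all : List Char, all.Nodup →
    lines.foldl step (all, all.filter P)
    = (lines.foldl (fun a l => pvAddA a l.toList) all,
       (lines.foldl (fun a l => pvAddA a l.toList) all).filter P) := by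
  induction lines with
  | nil => intro all h; simp
  | cons line lines ih =>
    intro all hnd
    rw [List.foldl_cons, List.foldl_cons, hstep]
    simp only [pvA_inner]
    have hnd' : (pvAddA all line.toList).Nodup := pvAddA_nodup _ _ hnd
    have hqnd : (all.filter P ++ pvNew all line.toList).Nodup := by
      rw [List.nodup_append]
      refine ⟨hnd.filter P, pvNew_nodup _ _, ?_⟩
      intro a ha b hb
      rintro rfl
      exact pvNew_not_mem _ _ a hb (List.mem_filter.mp ha).1
    rw [pvA_remove P _ _ hqnd]
    have hsub : ∀ c ∈ all.filter P ++ pvNew all line.toList, c ∈ pvAddA all line.toList := by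
      intro c hc
      rw [pvAddA_eq_append]
      rcases List.mem_append.mp hc with h | h
      · exact List.mem_append_left _ (List.mem_filter.mp h).1
      · exact List.mem_append_right _ h
    have hrw : (all.filter P ++ pvNew all line.toList).filter
        (fun c => P c || !((pvAddA all line.toList).contains c))
        = (all.filter P ++ pvNew all line.toList).filter P :=
      List.filter_congr fun c hc => by simp [hsub c hc]
    have h1 : (all.filter P ++ pvNew all line.toList).filter P
        = (pvAddA all line.toList).filter P := by
      conv_rhs => rw [pvAddA_eq_append]
      rw [List.filter_append, List.filter_append,
        show (all.filter P).filter P = all.filter P from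
          List.filter_eq_self.mpr (fun a ha => (List.mem_filter.mp ha).2)]
    rw [hrw, h1]
    exact ih _ hnd'

-- B's nested fold: invariant seen = all.filter Q
theorem pvB_inner (Q : Char → Bool) (cs : List Char) : ∀ all seen : List Char,
    seen = all.filter Q →
    cs.foldl (fun (seen : List Char) ch =>
      if Q ch && !(seen.contains ch) then seen ++ [ch] else seen) seen
    = (pvAddA all cs).filter Q := by
  induction cs with
  | nil => intro all seen h; rw [pvAddA_nil]; exact h
  | cons c cs ih =>
    intro all seen h
    subst h
    rw [List.foldl_cons, pvAddA_cons]
    by_cases hall : c ∈ all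
    · rw [if_pos hall]
      by_cases hQ : Q c = true
      · have hf : c ∈ all.filter Q := List.mem_filter.mpr ⟨hall, hQ⟩
        rw [if_neg (by simp [hf])]
        exact ih all _ rfl
      · rw [if_neg (by simp [hQ])]
        exact ih all _ rfl
    · rw [if_neg hall]
      have hf : c ∉ all.filter Q := fun hc => hall (List.mem_filter.mp hc).1
      by_cases hQ : Q c = true
      · rw [if_pos (by simp [hQ, hf])]
        have : all.filter Q ++ [c] = (all ++ [c]).filter Q := by
          rw [List.filter_append]; simp [hQ]
        rw [this]
        exact ih (all ++ [c]) _ rfl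
      · rw [if_neg (by simp [hQ])]
        have : all.filter Q = (all ++ [c]).filter Q := by
          rw [List.filter_append]; simp [hQ]
        rw [this]
        exact ih (all ++ [c]) _ rfl

theorem pvB_outer (Q : Char → Bool) (lines : List String) : ∀ all : List Char,
    lines.foldl (fun res line =>
      (PySem.List.dedup line.toList).foldl (fun (res : List Char) ch =>
        if Q ch && !(res.contains ch) then res ++ [ch] else res) res) (all.filter Q)
    = (lines.foldl (fun a l => pvAddA a l.toList) all).filter Q := by
  induction lines with
  | nil => intro all; simp
  | cons line lines ih =>
    intro all
    rw [List.foldl_cons, List.foldl_cons]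
    rw [pvB_inner Q (PySem.List.dedup line.toList) all _ rfl, pvAddA_dedup]
    exact ih _

-- membership in B's intersected set = "every line contains the letter"
theorem pvFold_inter_mem (c : Char) (tl : List String) : ∀ s : PySem.Set Char,
    (c ∈ tl.foldl (fun s line => PySem.Set.inter s (PySem.Set.ofList line.toList)) s)
    ↔ c ∈ s ∧ ∀ l ∈ tl, c ∈ l.toList := by
  induction tl with
  | nil => intro s; simp
  | cons u ul ih =>
    intro s
    rw [List.foldl_cons, ih]
    rw [PySem.Set.mem_inter, PySem.Set.mem_ofList]
    constructor
    · rintro ⟨⟨h1, h2⟩, h3⟩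
      exact ⟨h1, fun l hl => (List.mem_cons.mp hl).elim (fun e => e ▸ h2) (h3 l)⟩
    · rintro ⟨h1, h2⟩
      exact ⟨⟨h1, h2 u (List.mem_cons_self)⟩, fun l hl => h2 l (List.mem_cons_of_mem u hl)⟩

theorem pvCommon_mem (lines : List String) (hne : lines ≠ []) (c : Char) :
    (c ∈ (lines.drop 1).foldl (fun s line => PySem.Set.inter s (PySem.Set.ofList line.toList))
      (PySem.Set.ofList (lines.headD "").toList))
    ↔ ∀ l ∈ lines, c ∈ l.toList := by
  rcases lines with _ | ⟨hd, tl⟩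
  · exact absurd rfl hne
  · rw [List.drop_succ_cons, List.drop_zero, List.headD_cons, pvFold_inter_mem,
      PySem.Set.mem_ofList]
    constructor
    · rintro ⟨h1, h2⟩
      exact fun l hl => (List.mem_cons.mp hl).elim (fun e => e ▸ h1) (h2 l)
    · intro h
      exact ⟨h hd List.mem_cons_self, fun l hl => h l (List.mem_cons_of_mem hd hl)⟩

theorem pvGo_ne_nil (sep : List Char) (fuel : Nat) :
    ∀ l cur acc, PySem.Chars.splitOn.go sep fuel l cur acc ≠ [] := by
  induction fuel with
  | zero => intro l cur acc; simp [PySem.Chars.splitOn.go]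
  | succ fuel ih =>
    intro l cur acc
    cases l with
    | nil => simp [PySem.Chars.splitOn.go]
    | cons c rest =>
      rw [PySem.Chars.splitOn.go]
      split
      · apply ih
      · apply ih

theorem pvSplit_ne_nil (group : String) : (PySem.Str.split? group "\n").getD [] ≠ [] := by
  simp [PySem.Str.split?, PySem.Chars.split?, PySem.Chars.splitOn]
  intro h
  exact pvGo_ne_nil _ _ _ _ _ h

-- the whole equivalence, stated over an arbitrary (nonempty) line list
theorem pvMain (lines : List String) (hne : lines ≠ []) :
    ((lines.foldl (fun (st : List Char × List Char) line =>
        (let st := line.toList.foldl (fun (st : List Char × List Char) letter =>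
          if !(st.1.contains letter) then (st.1 ++ [letter], st.2 ++ [letter]) else st) st
         let qs := st.1.foldl (fun qs letter =>
          if !((lines.map (fun line => line.toList.contains letter)).all id) && qs.contains letter
          then (PySem.List.remove? qs letter).getD qs else qs) st.2
         (st.1, qs))) ([], [])).2).map (fun c => String.ofList [c])
    = (lines.foldl (fun res line =>
        (PySem.List.dedup line.toList).foldl (fun (res : List Char) ch =>
          if PySem.Set.contains ((lines.drop 1).foldl
              (fun s line => PySem.Set.inter s (PySem.Set.ofList line.toList))
              (PySem.Set.ofList (lines.headD "").toList)) ch && !(res.contains ch)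
          then res ++ [ch] else res) res) []).map (fun c => String.ofList [c]) := by
  simp only [List.all_map, Function.comp_def, id_eq]
  have hA := pvA_outer (fun c => lines.all (fun l => l.toList.contains c))
    (fun st line =>
      (let st := line.toList.foldl (fun (st : List Char × List Char) letter =>
        if !(st.1.contains letter) then (st.1 ++ [letter], st.2 ++ [letter]) else st) st
       let qs := st.1.foldl (fun qs letter =>
        if !(lines.all (fun line => line.toList.contains letter)) && qs.contains letter
        then (PySem.List.remove? qs letter).getD qs else qs) st.2
       (st.1, qs)))
    (fun _ _ => rfl) lines [] List.nodup_nil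
  simp only [List.filter_nil] at hA
  rw [hA]
  have hB := pvB_outer (fun ch => PySem.Set.contains ((lines.drop 1).foldl
      (fun s line => PySem.Set.inter s (PySem.Set.ofList line.toList))
      (PySem.Set.ofList (lines.headD "").toList)) ch) lines []
  simp only [List.filter_nil] at hB
  rw [hB]
  have hQP : (fun ch => PySem.Set.contains ((lines.drop 1).foldl
      (fun s line => PySem.Set.inter s (PySem.Set.ofList line.toList))
      (PySem.Set.ofList (lines.headD "").toList)) ch)
      = (fun c => lines.all (fun l => l.toList.contains c)) := by
    funext c
    rw [Bool.eq_iff_iff]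
    rw [PySem.Set.contains_iff, pvCommon_mem lines hne c]
    simp
  rw [hQP]

-- ===== VERDICT (by name: the statement is the Claim_ definition above) =====
theorem getListQuestions_spec : Claim_equal_getListQuestions := by
  unfold Claim_equal_getListQuestions
  intro group _
  unfold Spec_getListQuestions getListQuestions getListQuestions_alt
  exact pvMain ((PySem.Str.split? group "\n").getD []) (pvSplit_ne_nil group)
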